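-- pv_equiv track=rewrite | github.com/mnb27/RISCV-Simulator | binary_to_decimal.py | binary_2_decimal
-- ===== SOURCE A (Python) =====
-- def binary_2_decimal(imm):
--     if imm[0] == '0':
--         return int(imm, 2)
--     n = len(imm)
--     i = n - 1
--     while (i >= 0):
--         if (imm[i] == '1'):
--             break
--         i -= 1
--     if (i == -1):
--         return '1' + imm
--     k = i - 1
--     while (k >= 0):
--
--         if (imm[k] == '1'):
--             imm = list(imm)
--             imm[k] = '0'
--             imm = ''.join(imm)
--         else:
--             imm = list(imm)
--             imm[k] = '1'
--             imm = ''.join(imm)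
--
--         k -= 1
--         ans = int(imm, 2)
--     return -1 * ans
-- ===== SOURCE B (Python) =====
-- def binary_2_decimal(imm):
--     # Positive: plain binary value.  Negative (leading '1'): two's complement
--     # closed form  int(imm, 2) - 2**len(imm)  -- no scanning, no bit flipping.
--     if imm[0] == '0':
--         return int(imm, 2)
--     return int(imm, 2) - (1 << len(imm))
-- ===== Notes on version B (the rewrite author's own statement) =====
-- stated objective: simpler
-- what changed: Replaces A's scan-for-lowest-set-bit plus per-position string rebuild/reparse loop by the closed form int(imm,2) - (1 << len(imm)) for the negative case.
-- outside the precondition, e.g. on binary_2_decimal('1 1'): A returns -3, B raises ValueError; on binary_2_decimal('a'): A returns '1a', B raises ValueError; on binary_2_decimal(' 010'): A returns -14, B returns -14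
import Mathlib
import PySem

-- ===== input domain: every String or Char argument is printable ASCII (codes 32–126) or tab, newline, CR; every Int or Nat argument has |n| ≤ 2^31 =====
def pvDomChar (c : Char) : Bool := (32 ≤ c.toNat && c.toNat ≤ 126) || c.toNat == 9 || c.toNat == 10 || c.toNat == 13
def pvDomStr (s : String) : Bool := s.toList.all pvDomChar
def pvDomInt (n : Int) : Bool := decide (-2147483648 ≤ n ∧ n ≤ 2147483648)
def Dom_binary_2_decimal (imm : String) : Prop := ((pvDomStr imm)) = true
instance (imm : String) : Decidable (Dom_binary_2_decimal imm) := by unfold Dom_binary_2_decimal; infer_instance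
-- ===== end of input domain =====

-- B replaces A's scan-for-lowest-set-bit + per-position string rebuild/reparse loop by the
-- closed form int(imm,2) - (1 << len(imm)) for the negative case (objective: simpler).

-- ===== PORT A =====
-- int(s, 2), ported by hand: exact on the nonempty binary-digit strings Pre_ admits.
-- (Python's int(s, 2) additionally accepts whitespace / sign / '0b' / underscores; every
-- string on which that matters lies outside Pre_binary_2_decimal.)
def pvInt2? (l : List Char) : Option Int :=
  if l ≠ [] ∧ l.all (fun c => c == '0' || c == '1')
  then some (l.foldl (fun acc c => 2 * acc + (if c == '1' then 1 else 0)) 0)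
  else none

-- while (i >= 0): if imm[i] == '1': break ; i -= 1     (argument j = i + 1; j = 0 ↔ i = -1)
def pvFindAux (l : List Char) : Nat → Int
  | 0 => -1
  | j + 1 => if l.getD j ' ' == '1' then (j : Int) else pvFindAux l j

-- while (k >= 0): flip imm[k]; k -= 1; ans = int(imm, 2)   (argument m = k + 1; state (imm, ans))
def pvFlipAux : List Char → Option Int → Nat → List Char × Option Int
  | l, ans, 0 => (l, ans)
  | l, _, k + 1 =>
    let l' := if l.getD k ' ' == '1' then l.set k '0' else l.set k '1'
    pvFlipAux l' (pvInt2? l') k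

def binary_2_decimal (imm : String) : Int :=
  let l := imm.toList
  match PySem.List.pyGet? l 0 with
  | none => 0                               -- imm[0]: IndexError on '' (outside Pre_)
  | some c =>
    if c == '0' then (pvInt2? l).getD 0     -- int(imm, 2); ValueError outside Pre_
    else
      let i := pvFindAux l l.length
      if i == -1 then 0                     -- A returns the STRING '1'+imm here (outside Pre_)
      else
        match (pvFlipAux l none i.toNat).2 with
        | some ans => -1 * ans
        | none => 0                         -- 'ans' unbound: UnboundLocalError (outside Pre_)

-- ===== PORT B =====
def binary_2_decimal_alt (imm : String) : Int :=
  let l := imm.toList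
  match PySem.List.pyGet? l 0 with
  | none => 0                               -- imm[0]: IndexError on '' (outside Pre_)
  | some c =>
    if c == '0' then (pvInt2? l).getD 0
    else (pvInt2? l).getD 0 - ((1 : Int) <<< l.length)

-- ===== PRECONDITION & SPEC =====
-- Pre_ excludes: the empty string and strings with a character other than '0'/'1' (there A
-- raises IndexError/ValueError, returns the non-int string '1'+imm, or returns a value only
-- because its flip loop rewrites the offending characters — see the cites); and nonempty
-- binary strings whose only '1' is the leading character, where A raises UnboundLocalError
-- ('ans' is never assigned before use).
def Pre_binary_2_decimal (imm : String) : Prop :=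
  (!imm.toList.isEmpty
    && imm.toList.all (fun c => c == '0' || c == '1')
    && (imm.toList.headD ' ' == '0' || imm.toList.tail.contains '1')) = true
instance (imm : String) : Decidable (Pre_binary_2_decimal imm) := by
  unfold Pre_binary_2_decimal; infer_instance
def pvWitness_binary_2_decimal : String := "110"

def Spec_binary_2_decimal (imm : String) (out : Int) : Prop := out = binary_2_decimal_alt imm
instance (imm : String) (out : Int) : Decidable (Spec_binary_2_decimal imm out) := by
  unfold Spec_binary_2_decimal; infer_instance

-- ===== CLAIM (what is proved, stated in full; the proofs are below) =====
def Claim_equal_binary_2_decimal : Prop := ∀ (imm : String), Dom_binary_2_decimal imm →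
  Pre_binary_2_decimal imm → Spec_binary_2_decimal imm (binary_2_decimal imm)

-- ===== LEMMAS AND PROOFS =====

def pvBit (c : Char) : Int := if c == '1' then 1 else 0

def pvVal (l : List Char) : Int := l.foldl (fun acc c => 2 * acc + pvBit c) 0

def pvFlipc (c : Char) : Char := if c == '1' then '0' else '1'

theorem pvVal_foldl (b : List Char) (x : Int) :
    b.foldl (fun acc c => 2 * acc + pvBit c) x = x * 2 ^ b.length + pvVal b := by
  induction b generalizing x with
  | nil => simp [pvVal]
  | cons c t ih =>
    have h2 : pvVal (c :: t) = (2 * 0 + pvBit c) * 2 ^ t.length + pvVal t := by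
      show t.foldl (fun acc c => 2 * acc + pvBit c) (2 * 0 + pvBit c) = _
      rw [ih]
    rw [List.foldl_cons, ih, h2, List.length_cons]
    ring

theorem pvVal_cons (c : Char) (t : List Char) :
    pvVal (c :: t) = pvBit c * 2 ^ t.length + pvVal t := by
  show t.foldl (fun acc c => 2 * acc + pvBit c) (2 * 0 + pvBit c) = _
  rw [pvVal_foldl]
  ring

theorem pvVal_append (a b : List Char) :
    pvVal (a ++ b) = pvVal a * 2 ^ b.length + pvVal b := by
  show (a ++ b).foldl (fun acc c => 2 * acc + pvBit c) 0 = _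
  rw [List.foldl_append]
  exact pvVal_foldl b (pvVal a)

theorem pvVal_zeros (z : List Char) (hz : '1' ∉ z) : pvVal z = 0 := by
  induction z with
  | nil => simp [pvVal]
  | cons c t ih =>
    have hc : ¬ c = '1' := fun h => hz (by simp [h])
    rw [pvVal_cons, ih (fun h => hz (List.mem_cons_of_mem _ h))]
    simp [pvBit, hc]

theorem pvBit_flipc (c : Char) : pvBit (pvFlipc c) = 1 - pvBit c := by
  by_cases h : c = '1' <;> simp [pvBit, pvFlipc, h]

theorem pvVal_map_flipc (a : List Char) :
    pvVal (a.map pvFlipc) = 2 ^ a.length - 1 - pvVal a := by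
  induction a with
  | nil => simp [pvVal]
  | cons c t ih =>
    simp only [List.map_cons, pvVal_cons, List.length_map, List.length_cons, ih, pvBit_flipc]
    ring

theorem pvInt2?_binary (l : List Char) (hne : l ≠ [])
    (hb : ∀ c ∈ l, c = '0' ∨ c = '1') : pvInt2? l = some (pvVal l) := by
  have hall : l.all (fun c => c == '0' || c == '1') = true := by
    simp only [List.all_eq_true]
    intro c hc
    rcases hb c hc with h | h <;> simp [h]
  simp [pvInt2?, hne, hall, pvVal, pvBit]

-- the find loop returns the position of the last '1'
theorem pvFindAux_eq (l : List Char) (p : Nat) (hp : l.getD p ' ' = '1')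
    (hafter : ∀ j, p < j → l.getD j ' ' ≠ '1') :
    ∀ m, p < m → pvFindAux l m = (p : Int) := by
  intro m
  induction m with
  | zero => omega
  | succ q ih =>
    intro hpm
    by_cases hq : l.getD q ' ' = '1'
    · have hqp : q = p := by
        by_contra hne
        have hlt : p < q := by
          rcases Nat.lt_or_ge p q with h | h
          · exact h
          · omega
        exact hafter q hlt hq
      subst hqp
      simp only [pvFindAux]
      rw [if_pos (beq_iff_eq.mpr hq)]
    · have hpq : p < q := by
        have : p ≠ q := fun h => hq (h ▸ hp)
        omega
      simp only [pvFindAux]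
      rw [if_neg (by simpa using hq)]
      exact ih hpq

-- the flip loop rewrites exactly the first m characters
theorem pvFlipAux_fst (m : Nat) : ∀ (l : List Char) (a : Option Int), m ≤ l.length →
    (pvFlipAux l a m).1 = (l.take m).map pvFlipc ++ l.drop m := by
  induction m with
  | zero => intro l a _; simp [pvFlipAux]
  | succ k ih =>
    intro l a hm
    have hk : k < l.length := by omega
    have hset : (if l.getD k ' ' == '1' then l.set k '0' else l.set k '1')
        = l.set k (pvFlipc l[k]) := by
      by_cases h : l[k] = '1'
      · simp [List.getD_eq_getElem?_getD, List.getElem?_eq_getElem hk, h, pvFlipc]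
      · simp [List.getD_eq_getElem?_getD, List.getElem?_eq_getElem hk, h, pvFlipc]
    simp only [pvFlipAux, hset]
    rw [ih _ _ (by simp; omega)]
    have htake : (l.set k (pvFlipc l[k])).take k = l.take k := by
      apply List.ext_getElem <;> simp [List.getElem_set] <;> omega
    have hdrop : (l.set k (pvFlipc l[k])).drop k = pvFlipc l[k] :: l.drop (k + 1) := by
      rw [List.drop_eq_getElem_cons (by simpa using hk)]
      simp [List.drop_set]
    have h1 : List.take (k + 1) l = List.take k l ++ [l[k]] := by
      rw [List.take_add_one, List.getElem?_eq_getElem hk]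
      simp
    rw [htake, hdrop, h1, List.map_append]
    simp

-- after at least one iteration, ans is int() of the final string
theorem pvFlipAux_snd (m : Nat) : ∀ (l : List Char) (a : Option Int),
    (pvFlipAux l a (m + 1)).2 = pvInt2? (pvFlipAux l a (m + 1)).1 := by
  induction m with
  | zero => intro l a; simp [pvFlipAux]
  | succ k ih =>
    intro l a
    exact ih (if l.getD (k + 1) ' ' == '1' then l.set (k + 1) '0' else l.set (k + 1) '1')
      (pvInt2? (if l.getD (k + 1) ' ' == '1' then l.set (k + 1) '0' else l.set (k + 1) '1'))

theorem pvLast_mem_split {α : Type} [DecidableEq α] (v : α) (xs : List α) (h : v ∈ xs) :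
    ∃ a z, xs = a ++ v :: z ∧ v ∉ z := by
  induction xs with
  | nil => simp at h
  | cons x t ih =>
    by_cases hv : v ∈ t
    · obtain ⟨a, z, rfl, hz⟩ := ih hv
      exact ⟨x :: a, z, rfl, hz⟩
    · have : v = x := by rcases List.mem_cons.1 h with h | h; exact h; exact absurd h hv
      exact ⟨[], t, by simp [this], hv⟩

theorem pvShift (n : Nat) : ((1 : Int) <<< n) = 2 ^ n := by
  rw [Int.shiftLeft_eq]; ring

-- ===== VERDICT (by name: the statement is the Claim_ definition above) =====
theorem binary_2_decimal_spec : Claim_equal_binary_2_decimal := by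
  intro imm _ hpre
  unfold Pre_binary_2_decimal at hpre
  simp only [Bool.and_eq_true, Bool.or_eq_true, Bool.not_eq_true', List.all_eq_true,
    beq_iff_eq] at hpre
  obtain ⟨⟨hne', hbin⟩, hdisj⟩ := hpre
  have hne : imm.toList ≠ [] := by
    intro h; rw [h] at hne'; simp at hne'
  obtain ⟨c, t, hct⟩ : ∃ c t, imm.toList = c :: t := by
    cases h : imm.toList with
    | nil => exact absurd h hne
    | cons c t => exact ⟨c, t, rfl⟩
  rw [hct] at hbin
  unfold Spec_binary_2_decimal binary_2_decimal binary_2_decimal_alt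
  simp only [hct, PySem.List.pyGet?_zero_cons]
  by_cases hc0 : c = '0'
  · simp [hc0]
  · have hc1 : c = '1' := (hbin c (by simp)).resolve_left hc0
    subst hc1
    have hmem : '1' ∈ t := by
      rcases hdisj with h | h
      · rw [hct] at h
        simp only [List.headD_cons] at h
        exact absurd h hc0
      · rw [hct] at h; simpa using h
    obtain ⟨a', zs, hts, hzs⟩ := pvLast_mem_split '1' t hmem
    subst hts
    have hsplit : ('1' :: (a' ++ '1' :: zs) : List Char) = ('1' :: a') ++ '1' :: zs := by simp
    rw [hsplit] at hbin ⊢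
    have hlen : ((('1' :: a') ++ '1' :: zs : List Char)).length
        = (('1' :: a') : List Char).length + zs.length + 1 := by simp; omega
    have hgetp : (('1' :: a') ++ '1' :: zs : List Char).getD (('1' :: a') : List Char).length ' '
        = '1' := by
      rw [List.getD_eq_getElem?_getD, List.getElem?_append_right (le_refl _)]
      simp
    have hafter : ∀ j, (('1' :: a') : List Char).length < j →
        (('1' :: a') ++ '1' :: zs : List Char).getD j ' ' ≠ '1' := by
      intro j hj
      rw [List.getD_eq_getElem?_getD]
      by_cases hjl : j < (('1' :: a') ++ '1' :: zs : List Char).length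
      · rw [List.getElem?_append_right (by omega)]
        rw [show j - (('1' :: a') : List Char).length
            = (j - (('1' :: a') : List Char).length - 1) + 1 by omega]
        simp only [List.getElem?_cons_succ]
        intro hcon
        have hlt : j - (('1' :: a') : List Char).length - 1 < zs.length := by
          rw [hlen] at hjl; omega
        rw [List.getElem?_eq_getElem hlt] at hcon
        simp at hcon
        exact hzs (hcon ▸ List.getElem_mem hlt)
      · rw [List.getElem?_eq_none (by omega)]; simp
    have hfind : pvFindAux (('1' :: a') ++ '1' :: zs)
        (('1' :: a') ++ '1' :: zs : List Char).length
        = (((('1' :: a') : List Char).length : Nat) : Int) :=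
      pvFindAux_eq _ _ hgetp hafter _ (by rw [hlen]; omega)
    rw [hfind]
    rw [show ((((('1' :: a') : List Char).length : Nat) : Int) == -1) = false by simp; omega]
    rw [show (('1' : Char) == '0') = false by decide]
    simp only [Bool.false_eq_true, if_false, Int.toNat_natCast]
    have htk : (('1' :: a') ++ '1' :: zs : List Char).take (('1' :: a') : List Char).length
        = '1' :: a' := List.take_left
    have hdp : (('1' :: a') ++ '1' :: zs : List Char).drop (('1' :: a') : List Char).length
        = '1' :: zs := List.drop_left
    have hfst : (pvFlipAux (('1' :: a') ++ '1' :: zs) none (('1' :: a') : List Char).length).1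
        = (('1' :: a') : List Char).map pvFlipc ++ '1' :: zs := by
      rw [pvFlipAux_fst _ _ _ (by rw [hlen]; omega), htk, hdp]
    have hsnd : (pvFlipAux (('1' :: a') ++ '1' :: zs) none (('1' :: a') : List Char).length).2
        = pvInt2? ((('1' :: a') : List Char).map pvFlipc ++ '1' :: zs) := by
      rw [show (('1' :: a') : List Char).length = a'.length + 1 from by simp,
          pvFlipAux_snd a'.length,
          show a'.length + 1 = (('1' :: a') : List Char).length from by simp, hfst]
    have hFbin : ∀ d ∈ (('1' :: a') : List Char).map pvFlipc ++ '1' :: zs, d = '0' ∨ d = '1' := by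
      intro d hd
      rcases List.mem_append.1 hd with h | h
      · obtain ⟨e, _, rfl⟩ := List.mem_map.1 h
        by_cases he : e = '1' <;> simp [pvFlipc, he]
      · rcases List.mem_cons.1 h with h | h
        · right; exact h
        · exact hbin d (by simp [h])
    have hF : pvInt2? ((('1' :: a') : List Char).map pvFlipc ++ '1' :: zs)
        = some (pvVal ((('1' :: a') : List Char).map pvFlipc ++ '1' :: zs)) :=
      pvInt2?_binary _ (by simp) hFbin
    have hLv : pvInt2? (('1' :: a') ++ '1' :: zs)
        = some (pvVal (('1' :: a') ++ '1' :: zs)) :=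
      pvInt2?_binary _ (by simp) hbin
    rw [hsnd, hF, hLv]
    simp only [Option.getD_some]
    rw [pvShift]
    simp [pvVal_append, pvVal_map_flipc, pvVal_cons, pvVal_zeros zs hzs, pvBit, pvFlipc]
    ring
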